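-- pv_equiv track=rewrite | github.com/OZestina/TheGreatestGrace | codingTest/programmers/py/220304_프린터.py | solution
-- ===== SOURCE A (Python) =====
-- def solution(priorities, location):
--     answer = 0
--     position = 0
--     mydoc = priorities[location]
--
--     doc = {}          #내 문서보다 높은 우선순위 문서의 위치 기록용
--     sameprior = []    #내 문서와 같은 문서의 위치 기록용
--     for i in range(len(priorities)):
--         if priorities[i] < mydoc:           #우선순위 낮은 애는 countinue
--             continue
--         elif priorities[i] > mydoc:         #우선순위 높
--             if priorities[i] in doc:
--                 doc[priorities[i]] += [i]
--             else:
--                 doc[priorities[i]] = [i]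
--         else:                               # priorities[i] == mydoc
--             sameprior += [i]
--
--     for k,v in sorted(doc.items(), reverse=True): #doc에 있는 모든 문서를 대상으로 answer와 마지막 출력 position계산
--         answer += len(v)
--         if position == 0:
--             position = v[-1]
--         else:
--             if v[0] > position: position = v[-1]
--             else:
--                 temp = v[0]
--                 for i in v:
--                     if i < position:
--                         temp = i
--                     else:
--                         break
--                 position = temp
--
--     if position <= location:                      #우선순위 동일한 파일에 대해 answer 계산
--         for i in sameprior:
--             if i >= position and i <= location:
--                 answer += 1
--     else:   # position > location
--         for i in sameprior:
--             if i <= location or i > position: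
--                 answer += 1
--
--     return answer
-- ===== SOURCE B (Python) =====
-- def solution(priorities, location):
--     n = len(priorities)
--     mydoc = priorities[location]
--     ans = 0
--     pos = 0
--     for q in sorted(set(p for p in priorities if p > mydoc), reverse=True):
--         v = [i for i in range(n) if priorities[i] == q]
--         ans += len(v)
--         below = [i for i in v if i < pos]
--         pos = below[-1] if below else v[-1]
--     same = [i for i in range(n) if priorities[i] == mydoc]
--     if pos <= location:
--         ans += sum(1 for i in same if pos <= i <= location)
--     else:
--         ans += sum(1 for i in same if i <= location or i > pos)
--     return ans
-- ===== Notes on version B (the rewrite author's own statement) =====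
-- stated objective: simpler
-- what changed: B drops A's dict-grouping pass, its key-sorted items loop with three-way position branches plus an inner break-loop, and the two final counting loops; instead it sorts the distinct priorities above the target's, rescans the index range per priority with comprehensions, updates the position with one unified 'last index below position, else last index' filter rule, and counts the equal-priority documents with a single sum over a filtered range.
import Mathlib
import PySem

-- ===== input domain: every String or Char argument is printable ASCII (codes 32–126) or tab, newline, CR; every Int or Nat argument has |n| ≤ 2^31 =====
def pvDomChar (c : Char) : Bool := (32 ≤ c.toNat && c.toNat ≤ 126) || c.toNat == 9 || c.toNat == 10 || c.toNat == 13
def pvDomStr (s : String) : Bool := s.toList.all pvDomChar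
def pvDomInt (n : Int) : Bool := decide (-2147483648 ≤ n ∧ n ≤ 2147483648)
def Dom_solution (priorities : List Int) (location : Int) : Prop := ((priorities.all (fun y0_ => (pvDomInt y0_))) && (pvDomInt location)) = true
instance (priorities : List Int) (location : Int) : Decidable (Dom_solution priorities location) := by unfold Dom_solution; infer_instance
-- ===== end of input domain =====

-- B replaces A's dict-grouping and branchy position logic with sorted distinct priorities,
-- per-priority rescans and a unified filter rule: simpler, same return value on every admitted input.

-- ===== PORT A =====
-- the 'temp' loop inside A's second for-loop (a for with break)
def tempLoopA (v : List Int) (position temp : Int) : Int :=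
  match v with
  | [] => temp
  | i :: rest => if i < position then tempLoopA rest position i else temp

def solution (priorities : List Int) (location : Int) : Int :=
  match PySem.List.pyGet? priorities location with
  | none => 0  -- Python raises IndexError here; excluded by Pre_solution
  | some mydoc =>
    let st := (PySem.List.pyRange 0 (priorities.length : Int) 1).foldl
      (fun (st : PySem.Dict Int (List Int) × List Int) i =>
        if PySem.List.pyGetD priorities i 0 < mydoc then st
        else if PySem.List.pyGetD priorities i 0 > mydoc then
          (if st.1.contains (PySem.List.pyGetD priorities i 0) then
             st.1.insert (PySem.List.pyGetD priorities i 0)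
               (st.1.getD (PySem.List.pyGetD priorities i 0) [] ++ [i])
           else st.1.insert (PySem.List.pyGetD priorities i 0) [i], st.2)
        else (st.1, st.2 ++ [i]))
      (PySem.Dict.empty, [])
    -- dict keys are distinct, so Python's tuple comparison in sorted(doc.items(), reverse=True)
    -- is decided by the key alone: sorting by fst is exact here
    let st2 := (PySem.List.sorted st.1.items (fun p => p.1) true).foldl
      (fun (st2 : Int × Int) kv =>
        (st2.1 + (kv.2.length : Int),
         if st2.2 = 0 then PySem.List.pyGetD kv.2 (-1) 0
         else if PySem.List.pyGetD kv.2 0 0 > st2.2 then PySem.List.pyGetD kv.2 (-1) 0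
         else tempLoopA kv.2 st2.2 (PySem.List.pyGetD kv.2 0 0)))
      (0, 0)
    if st2.2 ≤ location then
      st.2.foldl (fun a i => if i ≥ st2.2 ∧ i ≤ location then a + 1 else a) st2.1
    else
      st.2.foldl (fun a i => if i ≤ location ∨ i > st2.2 then a + 1 else a) st2.1

-- ===== PORT B =====
def solution_alt (priorities : List Int) (location : Int) : Int :=
  match PySem.List.pyGet? priorities location with
  | none => 0  -- Python raises IndexError here; excluded by Pre_solution
  | some mydoc =>
    let n := (priorities.length : Int)
    let qs := PySem.List.sorted
      (PySem.Set.ofList (priorities.filter (fun p => decide (mydoc < p)))) (fun x => x) true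
    let st := qs.foldl
      (fun (st : Int × Int) q =>
        let v := (PySem.List.pyRange 0 n 1).filter
          (fun i => decide (PySem.List.pyGetD priorities i 0 = q))
        let below := v.filter (fun i => decide (i < st.2))
        (st.1 + (v.length : Int),
         if below ≠ [] then PySem.List.pyGetD below (-1) 0 else PySem.List.pyGetD v (-1) 0))
      (0, 0)
    let same := (PySem.List.pyRange 0 n 1).filter
      (fun i => decide (PySem.List.pyGetD priorities i 0 = mydoc))
    if st.2 ≤ location then
      st.1 + (same.countP (fun i => decide (st.2 ≤ i ∧ i ≤ location)) : Int)
    else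
      st.1 + (same.countP (fun i => decide (i ≤ location ∨ st.2 < i)) : Int)

-- ===== PRECONDITION & SPEC =====
-- Pre_ excludes exactly the locations on which Python's priorities[location] raises IndexError.
def Pre_solution (priorities : List Int) (location : Int) : Prop :=
  PySem.Raise.InRange priorities.length location
instance (priorities : List Int) (location : Int) : Decidable (Pre_solution priorities location) := by
  unfold Pre_solution; infer_instance
def pvWitness_solution : List Int × Int := ([2, 1, 3, 2], 2)

def Spec_solution (priorities : List Int) (location : Int) (out : Int) : Prop := out = solution_alt priorities location
instance (priorities : List Int) (location : Int) (out : Int) : Decidable (Spec_solution priorities location out) := by unfold Spec_solution; infer_instance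

-- ===== CLAIM (what is proved, stated in full; the proofs are below) =====
def Claim_equal_solution : Prop := ∀ (priorities : List Int) (location : Int), Dom_solution priorities location → Pre_solution priorities location → Spec_solution priorities location (solution priorities location)

-- ===== LEMMAS AND PROOFS =====

-- the dict-building step of A's first loop
def pvFD (priorities : List Int) (m : Int) (d : PySem.Dict Int (List Int)) (i : Int) :
    PySem.Dict Int (List Int) :=
  if PySem.List.pyGetD priorities i 0 < m then d
  else if PySem.List.pyGetD priorities i 0 > m then
    (if d.contains (PySem.List.pyGetD priorities i 0) then
       d.insert (PySem.List.pyGetD priorities i 0)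
         (d.getD (PySem.List.pyGetD priorities i 0) [] ++ [i])
     else d.insert (PySem.List.pyGetD priorities i 0) [i])
  else d

-- the keys of A's dict: distinct priorities above m, in first-occurrence order
def pvK (priorities : List Int) (m : Int) (l : List Int) : List Int :=
  PySem.Set.ofList
    ((l.filter (fun i => decide (m < PySem.List.pyGetD priorities i 0))).map
      (fun i => PySem.List.pyGetD priorities i 0))

theorem pvFD_low (priorities : List Int) (m : Int) (d : PySem.Dict Int (List Int)) (i : Int)
    (h : ¬ (PySem.List.pyGetD priorities i 0 > m)) : pvFD priorities m d i = d := by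
  unfold pvFD
  by_cases h1 : PySem.List.pyGetD priorities i 0 < m
  · rw [if_pos h1]
  · rw [if_neg h1, if_neg h]

theorem pvFD_gt_contains (priorities : List Int) (m : Int) (d : PySem.Dict Int (List Int)) (i : Int)
    (hgt : PySem.List.pyGetD priorities i 0 > m)
    (hc : d.contains (PySem.List.pyGetD priorities i 0) = true) :
    pvFD priorities m d i
      = d.insert (PySem.List.pyGetD priorities i 0)
          (d.getD (PySem.List.pyGetD priorities i 0) [] ++ [i]) := by
  unfold pvFD
  rw [if_neg (by omega), if_pos hgt, if_pos hc]

theorem pvFD_gt_not (priorities : List Int) (m : Int) (d : PySem.Dict Int (List Int)) (i : Int)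
    (hgt : PySem.List.pyGetD priorities i 0 > m)
    (hc : d.contains (PySem.List.pyGetD priorities i 0) = false) :
    pvFD priorities m d i = d.insert (PySem.List.pyGetD priorities i 0) [i] := by
  unfold pvFD
  rw [if_neg (by omega), if_pos hgt, if_neg (by simp [hc])]

theorem pv_K_mem (priorities : List Int) (m : Int) (l : List Int) {k : Int}
    (hk : k ∈ pvK priorities m l) :
    m < k ∧ ∃ i, i ∈ l ∧ PySem.List.pyGetD priorities i 0 = k := by
  unfold pvK at hk
  rw [PySem.Set.mem_ofList] at hk
  obtain ⟨i, hi, rfl⟩ := List.mem_map.mp hk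
  obtain ⟨hil, hdec⟩ := List.mem_filter.mp hi
  exact ⟨of_decide_eq_true hdec, i, hil, rfl⟩

theorem pv_K_mem_of (priorities : List Int) (m : Int) (l : List Int) {i : Int} (hi : i ∈ l)
    (hm : m < PySem.List.pyGetD priorities i 0) :
    PySem.List.pyGetD priorities i 0 ∈ pvK priorities m l := by
  unfold pvK
  rw [PySem.Set.mem_ofList]
  exact List.mem_map.mpr ⟨i, List.mem_filter.mpr ⟨hi, decide_eq_true hm⟩, rfl⟩

-- splitting A's first loop into its two independent accumulators
theorem pv_split1 (priorities : List Int) (m : Int) :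
    ∀ (l : List Int) (d0 : PySem.Dict Int (List Int)) (s0 : List Int),
    l.foldl (fun (st : PySem.Dict Int (List Int) × List Int) i =>
        if PySem.List.pyGetD priorities i 0 < m then st
        else if PySem.List.pyGetD priorities i 0 > m then
          (if st.1.contains (PySem.List.pyGetD priorities i 0) then
             st.1.insert (PySem.List.pyGetD priorities i 0)
               (st.1.getD (PySem.List.pyGetD priorities i 0) [] ++ [i])
           else st.1.insert (PySem.List.pyGetD priorities i 0) [i], st.2)
        else (st.1, st.2 ++ [i])) (d0, s0)
      = (l.foldl (pvFD priorities m) d0,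
         l.foldl (fun s i =>
           if PySem.List.pyGetD priorities i 0 < m then s
           else if PySem.List.pyGetD priorities i 0 > m then s
           else s ++ [i]) s0) := by
  intro l
  induction l with
  | nil => intro d0 s0; rfl
  | cons i t ih =>
    intro d0 s0
    rw [List.foldl_cons, List.foldl_cons, List.foldl_cons]
    have hstep : (if PySem.List.pyGetD priorities i 0 < m
          then ((d0, s0) : PySem.Dict Int (List Int) × List Int)
        else if PySem.List.pyGetD priorities i 0 > m then
          (if d0.contains (PySem.List.pyGetD priorities i 0) then
             d0.insert (PySem.List.pyGetD priorities i 0)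
               (d0.getD (PySem.List.pyGetD priorities i 0) [] ++ [i])
           else d0.insert (PySem.List.pyGetD priorities i 0) [i], s0)
        else (d0, s0 ++ [i]))
        = ((pvFD priorities m d0 i),
           (if PySem.List.pyGetD priorities i 0 < m then s0
            else if PySem.List.pyGetD priorities i 0 > m then s0
            else s0 ++ [i])) := by
      unfold pvFD
      split_ifs <;> rfl
    rw [hstep]
    exact ih _ _

-- A's 'sameprior' accumulator is a filter
theorem pv_foldl_same (priorities : List Int) (m : Int) :
    ∀ (l : List Int) (acc : List Int),
    l.foldl (fun s i =>
        if PySem.List.pyGetD priorities i 0 < m then s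
        else if PySem.List.pyGetD priorities i 0 > m then s
        else s ++ [i]) acc
      = acc ++ l.filter (fun i => decide (PySem.List.pyGetD priorities i 0 = m)) := by
  intro l
  induction l with
  | nil => intro acc; simp
  | cons i t ih =>
    intro acc
    rw [List.foldl_cons, ih, List.filter_cons]
    rcases lt_trichotomy (PySem.List.pyGetD priorities i 0) m with h | h | h
    · rw [if_pos h]
      simp [h.ne]
    · rw [if_neg (by omega), if_neg (by omega)]
      simp [h]
    · rw [if_neg (by omega), if_pos h]
      simp [show ¬ (PySem.List.pyGetD priorities i 0 = m) by omega]

-- characterization of A's dict after its first loop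
theorem pv_dict (priorities : List Int) (m : Int) (l : List Int) :
    (l.foldl (pvFD priorities m) PySem.Dict.empty).items
      = (pvK priorities m l).map
          (fun k => (k, l.filter (fun i => decide (PySem.List.pyGetD priorities i 0 = k)))) := by
  induction l using List.reverseRecOn with
  | nil => rfl
  | append_singleton l i ih =>
    rw [List.foldl_append, List.foldl_cons, List.foldl_nil]
    rcases lt_trichotomy (PySem.List.pyGetD priorities i 0) m with hlt | heqm | hgt
    · have hKeq : pvK priorities m (l ++ [i]) = pvK priorities m l := by
        unfold pvK
        rw [List.filter_append]
        simp [show ¬ (m < PySem.List.pyGetD priorities i 0) by omega]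
      rw [pvFD_low priorities m _ i (by omega), ih, hKeq]
      apply List.map_congr_left
      intro k hk
      obtain ⟨hmk, -⟩ := pv_K_mem priorities m l hk
      rw [List.filter_append]
      simp [show ¬ (PySem.List.pyGetD priorities i 0 = k) by omega]
    · have hKeq : pvK priorities m (l ++ [i]) = pvK priorities m l := by
        unfold pvK
        rw [List.filter_append]
        simp [show ¬ (m < PySem.List.pyGetD priorities i 0) by omega]
      rw [pvFD_low priorities m _ i (by omega), ih, hKeq]
      apply List.map_congr_left
      intro k hk
      obtain ⟨hmk, -⟩ := pv_K_mem priorities m l hk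
      rw [List.filter_append]
      simp [show ¬ (PySem.List.pyGetD priorities i 0 = k) by omega]
    · have hkeys : (l.foldl (pvFD priorities m) PySem.Dict.empty).keys = pvK priorities m l := by
        simp only [PySem.Dict.keys]
        rw [ih, List.map_map]
        have hcomp : ((fun x : Int × List Int => x.1) ∘
            fun k : Int => (k, l.filter (fun i => decide (PySem.List.pyGetD priorities i 0 = k))))
            = fun k : Int => k := rfl
        rw [hcomp]
        simp
      have hnd : (l.foldl (pvFD priorities m) PySem.Dict.empty).keys.Nodup := by
        rw [hkeys]; unfold pvK; exact PySem.Set.nodup_ofList _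
      have hcontIff : (l.foldl (pvFD priorities m) PySem.Dict.empty).contains
          (PySem.List.pyGetD priorities i 0) = true
          ↔ PySem.List.pyGetD priorities i 0 ∈ pvK priorities m l := by
        rw [PySem.Dict.contains_iff_mem_keys, hkeys]
      have hKapp : pvK priorities m (l ++ [i])
          = PySem.Set.add (pvK priorities m l) (PySem.List.pyGetD priorities i 0) := by
        unfold pvK
        rw [List.filter_append]
        simp only [List.filter_cons, List.filter_nil, decide_eq_true hgt, if_pos,
          List.map_append, List.map_cons, List.map_nil]
        exact PySem.Set.ofList_append_singleton _ _
      by_cases hmem : PySem.List.pyGetD priorities i 0 ∈ pvK priorities m l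
      · have hc : (l.foldl (pvFD priorities m) PySem.Dict.empty).contains
            (PySem.List.pyGetD priorities i 0) = true := hcontIff.mpr hmem
        have hval : (l.foldl (pvFD priorities m) PySem.Dict.empty).getD
            (PySem.List.pyGetD priorities i 0) []
            = l.filter (fun j => decide (PySem.List.pyGetD priorities j 0
                = PySem.List.pyGetD priorities i 0)) :=
          PySem.Dict.getD_of_get?_eq_some _ []
            (PySem.Dict.get?_of_mem_items _
              (by rw [ih]
                  exact List.mem_map.mpr ⟨PySem.List.pyGetD priorities i 0, hmem, rfl⟩) hnd)
        rw [pvFD_gt_contains priorities m _ i hgt hc, hval,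
          PySem.Dict.items_insert_of_contains _ _ hc, ih, hKapp,
          PySem.Set.add_of_mem hmem, List.map_map]
        apply List.map_congr_left
        intro k hk
        by_cases hek : k = PySem.List.pyGetD priorities i 0
        · subst hek
          simp [Function.comp, List.filter_append]
        · have hne2 : ¬ (PySem.List.pyGetD priorities i 0 = k) := fun h => hek h.symm
          simp [Function.comp, hek, List.filter_append, hne2]
      · have hc : ¬ ((l.foldl (pvFD priorities m) PySem.Dict.empty).contains
            (PySem.List.pyGetD priorities i 0) = true) := fun h => hmem (hcontIff.mp h)
        have hcf : (l.foldl (pvFD priorities m) PySem.Dict.empty).contains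
            (PySem.List.pyGetD priorities i 0) = false := by simpa using hc
        have hfl : l.filter (fun j => decide (PySem.List.pyGetD priorities j 0
            = PySem.List.pyGetD priorities i 0)) = [] := by
          rw [List.filter_eq_nil_iff]
          intro j hj
          simp only [decide_eq_true_eq]
          intro hPj
          exact hmem (hPj ▸ pv_K_mem_of priorities m l hj (by omega))
        rw [pvFD_gt_not priorities m _ i hgt hcf,
          PySem.Dict.items_insert_of_not_contains _ _ hcf, ih, hKapp,
          PySem.Set.add_of_not_mem hmem, List.map_append]
        congr 1
        · apply List.map_congr_left
          intro k hk
          have hne2 : ¬ (PySem.List.pyGetD priorities i 0 = k) := fun h => hmem (h ▸ hk)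
          rw [List.filter_append]
          simp [hne2]
        · simp [List.filter_append, hfl]

-- strengthen a reverse-sorted nodup list to strict descent
theorem pv_pairwise_gt {l : List Int} (h1 : l.Pairwise (fun a b => b ≤ a)) (h2 : l.Nodup) :
    l.Pairwise (fun a b => b < a) := by
  induction l with
  | nil => exact List.Pairwise.nil
  | cons x t ih =>
    rw [List.pairwise_cons] at h1 ⊢
    rw [List.nodup_cons] at h2
    refine ⟨fun y hy => ?_, ih h1.2 h2.2⟩
    have h3 := h1.1 y hy
    have h4 : x ≠ y := fun h => h2.1 (h ▸ hy)
    omega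

-- sorting A's items by key equals mapping over the reverse-sorted key set
theorem pv_sorted_items (priorities : List Int) (m : Int) (l : List Int) :
    PySem.List.sorted
        ((pvK priorities m l).map
          (fun k => (k, l.filter (fun i => decide (PySem.List.pyGetD priorities i 0 = k)))))
        (fun p => p.1) true
      = (PySem.List.sorted (pvK priorities m l) (fun x => x) true).map
          (fun k => (k, l.filter (fun i => decide (PySem.List.pyGetD priorities i 0 = k)))) := by
  have hperm : ((PySem.List.sorted (pvK priorities m l) (fun x => x) true).map
      (fun k => (k, l.filter (fun i => decide (PySem.List.pyGetD priorities i 0 = k))))).Perm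
      ((pvK priorities m l).map
        (fun k => (k, l.filter (fun i => decide (PySem.List.pyGetD priorities i 0 = k))))) :=
    (PySem.List.sorted_perm _ _ _).map _
  have hndK : (pvK priorities m l).Nodup := by unfold pvK; exact PySem.Set.nodup_ofList _
  have hndKs : (PySem.List.sorted (pvK priorities m l) (fun x => x) true).Nodup :=
    ((PySem.List.sorted_perm _ _ _).nodup_iff).mpr hndK
  have hge : (PySem.List.sorted (pvK priorities m l) (fun x => x) true).Pairwise
      (fun a b => b ≤ a) := PySem.List.sorted_pairwise_rev _ _
  have hgt := pv_pairwise_gt hge hndKs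
  have hpw : ((PySem.List.sorted (pvK priorities m l) (fun x => x) true).map
      (fun k => (k, l.filter (fun i => decide (PySem.List.pyGetD priorities i 0 = k))))).Pairwise
      (fun a b => b.1 < a.1) := by
    rw [List.pairwise_map]
    exact hgt
  exact PySem.List.sorted_rev_eq_of_perm_of_pairwise_gt _ _ _ hperm hpw

-- splitting the second loops into their two independent accumulators
theorem pv_split2A (priorities : List Int) :
    ∀ (rs : List Int) (a b : Int),
    rs.foldl (fun (st2 : Int × Int) k =>
        (st2.1 + (((PySem.List.pyRange 0 (priorities.length : Int) 1).filter
            (fun i => decide (PySem.List.pyGetD priorities i 0 = k))).length : Int),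
         if st2.2 = 0 then
           PySem.List.pyGetD ((PySem.List.pyRange 0 (priorities.length : Int) 1).filter
             (fun i => decide (PySem.List.pyGetD priorities i 0 = k))) (-1) 0
         else if PySem.List.pyGetD ((PySem.List.pyRange 0 (priorities.length : Int) 1).filter
             (fun i => decide (PySem.List.pyGetD priorities i 0 = k))) 0 0 > st2.2 then
           PySem.List.pyGetD ((PySem.List.pyRange 0 (priorities.length : Int) 1).filter
             (fun i => decide (PySem.List.pyGetD priorities i 0 = k))) (-1) 0
         else tempLoopA ((PySem.List.pyRange 0 (priorities.length : Int) 1).filter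
             (fun i => decide (PySem.List.pyGetD priorities i 0 = k))) st2.2
           (PySem.List.pyGetD ((PySem.List.pyRange 0 (priorities.length : Int) 1).filter
             (fun i => decide (PySem.List.pyGetD priorities i 0 = k))) 0 0))) (a, b)
      = (rs.foldl (fun x k => x + (((PySem.List.pyRange 0 (priorities.length : Int) 1).filter
            (fun i => decide (PySem.List.pyGetD priorities i 0 = k))).length : Int)) a,
         rs.foldl (fun pos k =>
           if pos = 0 then
             PySem.List.pyGetD ((PySem.List.pyRange 0 (priorities.length : Int) 1).filter
               (fun i => decide (PySem.List.pyGetD priorities i 0 = k))) (-1) 0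
           else if PySem.List.pyGetD ((PySem.List.pyRange 0 (priorities.length : Int) 1).filter
               (fun i => decide (PySem.List.pyGetD priorities i 0 = k))) 0 0 > pos then
             PySem.List.pyGetD ((PySem.List.pyRange 0 (priorities.length : Int) 1).filter
               (fun i => decide (PySem.List.pyGetD priorities i 0 = k))) (-1) 0
           else tempLoopA ((PySem.List.pyRange 0 (priorities.length : Int) 1).filter
               (fun i => decide (PySem.List.pyGetD priorities i 0 = k))) pos
             (PySem.List.pyGetD ((PySem.List.pyRange 0 (priorities.length : Int) 1).filter
               (fun i => decide (PySem.List.pyGetD priorities i 0 = k))) 0 0)) b) := by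
  intro rs
  induction rs with
  | nil => intro a b; rfl
  | cons k t ih =>
    intro a b
    rw [List.foldl_cons, List.foldl_cons, List.foldl_cons]
    exact ih _ _

theorem pv_split2B (priorities : List Int) :
    ∀ (rs : List Int) (a b : Int),
    rs.foldl (fun (st : Int × Int) q =>
        (st.1 + (((PySem.List.pyRange 0 (priorities.length : Int) 1).filter
            (fun i => decide (PySem.List.pyGetD priorities i 0 = q))).length : Int),
         if ((PySem.List.pyRange 0 (priorities.length : Int) 1).filter
             (fun i => decide (PySem.List.pyGetD priorities i 0 = q))).filter
             (fun i => decide (i < st.2)) ≠ [] then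
           PySem.List.pyGetD (((PySem.List.pyRange 0 (priorities.length : Int) 1).filter
             (fun i => decide (PySem.List.pyGetD priorities i 0 = q))).filter
             (fun i => decide (i < st.2))) (-1) 0
         else PySem.List.pyGetD ((PySem.List.pyRange 0 (priorities.length : Int) 1).filter
             (fun i => decide (PySem.List.pyGetD priorities i 0 = q))) (-1) 0)) (a, b)
      = (rs.foldl (fun x k => x + (((PySem.List.pyRange 0 (priorities.length : Int) 1).filter
            (fun i => decide (PySem.List.pyGetD priorities i 0 = k))).length : Int)) a,
         rs.foldl (fun pos k =>
           if ((PySem.List.pyRange 0 (priorities.length : Int) 1).filter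
               (fun i => decide (PySem.List.pyGetD priorities i 0 = k))).filter
               (fun i => decide (i < pos)) ≠ [] then
             PySem.List.pyGetD (((PySem.List.pyRange 0 (priorities.length : Int) 1).filter
               (fun i => decide (PySem.List.pyGetD priorities i 0 = k))).filter
               (fun i => decide (i < pos))) (-1) 0
           else PySem.List.pyGetD ((PySem.List.pyRange 0 (priorities.length : Int) 1).filter
               (fun i => decide (PySem.List.pyGetD priorities i 0 = k))) (-1) 0) b) := by
  intro rs
  induction rs with
  | nil => intro a b; rfl
  | cons k t ih =>
    intro a b
    rw [List.foldl_cons, List.foldl_cons, List.foldl_cons]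
    exact ih _ _

theorem pv_getLast_cons (xs : List Int) (i t : Int) :
    (((i :: xs).getLast?).getD t) = ((xs.getLast?).getD i) := by
  cases xs with
  | nil => rfl
  | cons a b =>
    rw [List.getLast?_cons_cons]
    cases h : (a :: b).getLast? with
    | none => simp at h
    | some y => rfl

-- A's temp loop on an ascending list returns the last element below position (default t)
theorem pv_temp : ∀ (v : List Int) (pos t : Int), v.Pairwise (· < ·) →
    tempLoopA v pos t = ((v.filter (fun i => decide (i < pos))).getLast?).getD t := by
  intro v
  induction v with
  | nil => intro pos t _; rfl
  | cons i rest ih =>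
    intro pos t hasc
    rw [List.pairwise_cons] at hasc
    show (if i < pos then tempLoopA rest pos i else t) = _
    by_cases h : i < pos
    · rw [if_pos h, ih pos i hasc.2, List.filter_cons]
      simp only [decide_eq_true h, if_pos]
      rw [pv_getLast_cons]
    · rw [if_neg h]
      have hfl : (i :: rest).filter (fun j => decide (j < pos)) = [] := by
        rw [List.filter_eq_nil_iff]
        intro j hj
        simp only [decide_eq_true_eq]
        rcases List.mem_cons.mp hj with rfl | hjr
        · omega
        · have := hasc.1 j hjr
          omega
      rw [hfl]
      rfl

-- one step of the position update: A's three branches equal B's unified filter rule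
theorem pv_step (vk : List Int) (pos : Int)
    (hne : vk ≠ []) (hasc : vk.Pairwise (· < ·)) (hnn : ∀ j ∈ vk, 0 ≤ j)
    (hpos : pos = 0 ∨ ∀ j ∈ vk, j ≠ pos) :
    ((if pos = 0 then PySem.List.pyGetD vk (-1) 0
      else if PySem.List.pyGetD vk 0 0 > pos then PySem.List.pyGetD vk (-1) 0
      else tempLoopA vk pos (PySem.List.pyGetD vk 0 0))
     = (if vk.filter (fun i => decide (i < pos)) ≠ [] then
          PySem.List.pyGetD (vk.filter (fun i => decide (i < pos))) (-1) 0
        else PySem.List.pyGetD vk (-1) 0))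
    ∧ (if vk.filter (fun i => decide (i < pos)) ≠ [] then
          PySem.List.pyGetD (vk.filter (fun i => decide (i < pos))) (-1) 0
        else PySem.List.pyGetD vk (-1) 0) ∈ vk := by
  obtain ⟨hd, tl, rfl⟩ := List.exists_cons_of_ne_nil hne
  have hlast : PySem.List.pyGetD (hd :: tl) (-1) 0 ∈ hd :: tl := by
    rw [PySem.List.pyGetD_neg_one (hd :: tl) 0 (by simp)]
    exact List.getLast_mem _
  have h0 : PySem.List.pyGetD (hd :: tl) 0 0 = hd := PySem.List.pyGetD_zero_cons hd tl 0
  have hasc' := hasc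
  rw [List.pairwise_cons] at hasc'
  by_cases hp0 : pos = 0
  · subst hp0
    have hb : (hd :: tl).filter (fun i => decide (i < 0)) = [] := by
      rw [List.filter_eq_nil_iff]
      intro j hj
      have := hnn j hj
      simp only [decide_eq_true_eq]
      omega
    rw [hb]
    constructor
    · rw [if_pos rfl, if_neg (by simp)]
    · rw [if_neg (by simp)]
      exact hlast
  · have hne_all : ∀ j ∈ hd :: tl, j ≠ pos := hpos.resolve_left hp0
    rcases lt_trichotomy hd pos with hlt | heq | hgtp
    · -- hd < pos: below is nonempty, A takes its temp loop
      have hbne : (hd :: tl).filter (fun i => decide (i < pos)) ≠ [] := by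
        rw [List.filter_cons]
        simp [hlt]
      constructor
      · rw [if_neg hp0, h0, if_neg (show ¬ hd > pos by omega),
          pv_temp (hd :: tl) pos hd hasc, if_pos hbne,
          PySem.List.pyGetD_neg_one _ 0 hbne, List.getLast?_eq_some_getLast hbne]
        rfl
      · rw [if_pos hbne, PySem.List.pyGetD_neg_one _ 0 hbne]
        exact List.mem_of_mem_filter (List.getLast_mem hbne)
    · exact absurd heq (hne_all hd List.mem_cons_self)
    · -- pos < hd: below is empty, both take v[-1]
      have hb : (hd :: tl).filter (fun i => decide (i < pos)) = [] := by
        rw [List.filter_eq_nil_iff]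
        intro j hj
        simp only [decide_eq_true_eq]
        rcases List.mem_cons.mp hj with rfl | hjr
        · omega
        · have := hasc'.1 j hjr
          omega
      rw [hb]
      constructor
      · rw [if_neg hp0, h0, if_pos hgtp, if_neg (by simp)]
      · rw [if_neg (by simp)]
        exact hlast

-- B's position fold equals A's, under the loop invariant
theorem pv_fold2 (priorities : List Int) :
    ∀ (rs : List Int) (pos : Int), rs.Nodup →
      (∀ k ∈ rs, (PySem.List.pyRange 0 (priorities.length : Int) 1).filter
          (fun i => decide (PySem.List.pyGetD priorities i 0 = k)) ≠ []) →
      (pos = 0 ∨ ∀ k ∈ rs, PySem.List.pyGetD priorities pos 0 ≠ k) →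
      rs.foldl (fun pos k =>
          if pos = 0 then
            PySem.List.pyGetD ((PySem.List.pyRange 0 (priorities.length : Int) 1).filter
              (fun i => decide (PySem.List.pyGetD priorities i 0 = k))) (-1) 0
          else if PySem.List.pyGetD ((PySem.List.pyRange 0 (priorities.length : Int) 1).filter
              (fun i => decide (PySem.List.pyGetD priorities i 0 = k))) 0 0 > pos then
            PySem.List.pyGetD ((PySem.List.pyRange 0 (priorities.length : Int) 1).filter
              (fun i => decide (PySem.List.pyGetD priorities i 0 = k))) (-1) 0
          else tempLoopA ((PySem.List.pyRange 0 (priorities.length : Int) 1).filter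
              (fun i => decide (PySem.List.pyGetD priorities i 0 = k))) pos
            (PySem.List.pyGetD ((PySem.List.pyRange 0 (priorities.length : Int) 1).filter
              (fun i => decide (PySem.List.pyGetD priorities i 0 = k))) 0 0)) pos
      = rs.foldl (fun pos k =>
          if ((PySem.List.pyRange 0 (priorities.length : Int) 1).filter
              (fun i => decide (PySem.List.pyGetD priorities i 0 = k))).filter
              (fun i => decide (i < pos)) ≠ [] then
            PySem.List.pyGetD (((PySem.List.pyRange 0 (priorities.length : Int) 1).filter
              (fun i => decide (PySem.List.pyGetD priorities i 0 = k))).filter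
              (fun i => decide (i < pos))) (-1) 0
          else PySem.List.pyGetD ((PySem.List.pyRange 0 (priorities.length : Int) 1).filter
              (fun i => decide (PySem.List.pyGetD priorities i 0 = k))) (-1) 0) pos := by
  intro rs
  induction rs with
  | nil => intro pos _ _ _; rfl
  | cons k rest ih =>
    intro pos hnd hne hinv
    rw [List.foldl_cons, List.foldl_cons]
    have hasc : ((PySem.List.pyRange 0 (priorities.length : Int) 1).filter
        (fun i => decide (PySem.List.pyGetD priorities i 0 = k))).Pairwise (· < ·) :=
      List.Pairwise.filter _ (PySem.List.pairwise_lt_pyRange_one 0 _)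
    have hprop : ∀ j ∈ (PySem.List.pyRange 0 (priorities.length : Int) 1).filter
        (fun i => decide (PySem.List.pyGetD priorities i 0 = k)),
        0 ≤ j ∧ PySem.List.pyGetD priorities j 0 = k := by
      intro j hj
      obtain ⟨hjr, hdec⟩ := List.mem_filter.mp hj
      exact ⟨(PySem.List.mem_pyRange_one.mp hjr).1, of_decide_eq_true hdec⟩
    have hpos' : pos = 0 ∨ ∀ j ∈ (PySem.List.pyRange 0 (priorities.length : Int) 1).filter
        (fun i => decide (PySem.List.pyGetD priorities i 0 = k)), j ≠ pos := by
      rcases hinv with h | h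
      · exact Or.inl h
      · refine Or.inr fun j hj hje => h k List.mem_cons_self ?_
        rw [← (hprop j hj).2, hje]
    obtain ⟨heq, hmem⟩ := pv_step _ pos (hne k List.mem_cons_self) hasc
      (fun j hj => (hprop j hj).1) hpos'
    rw [heq]
    rw [List.nodup_cons] at hnd
    apply ih _ hnd.2 (fun k' hk' => hne k' (List.mem_cons_of_mem _ hk'))
    refine Or.inr fun k' hk' hPk' => ?_
    have hPk := (hprop _ hmem).2
    rw [hPk] at hPk'
    exact hnd.1 (hPk' ▸ hk')

-- Prop-conditioned counting loop is countP
theorem pv_foldl_count (c : Int → Prop) [DecidablePred c] :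
    ∀ (l : List Int) (a : Int),
    l.foldl (fun a i => if c i then a + 1 else a) a
      = a + (l.countP (fun i => decide (c i)) : Int) := by
  intro l
  induction l with
  | nil => intro a; simp
  | cons i t ih =>
    intro a
    rw [List.foldl_cons, List.countP_cons]
    by_cases h : c i
    · rw [if_pos h, ih]
      simp only [decide_eq_true h, if_pos]
      push_cast
      ring
    · rw [if_neg h, ih]
      simp [h]

-- the final counting branches of A and B agree
theorem pv_final (sameL : List Int) (ans pos location : Int) :
    (if pos ≤ location then
       sameL.foldl (fun a i => if i ≥ pos ∧ i ≤ location then a + 1 else a) ans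
     else sameL.foldl (fun a i => if i ≤ location ∨ i > pos then a + 1 else a) ans)
    = (if pos ≤ location then
         ans + (sameL.countP (fun i => decide (pos ≤ i ∧ i ≤ location)) : Int)
       else ans + (sameL.countP (fun i => decide (i ≤ location ∨ pos < i)) : Int)) := by
  by_cases h : pos ≤ location
  · rw [if_pos h, if_pos h, pv_foldl_count (fun i => i ≥ pos ∧ i ≤ location) sameL ans]
  · rw [if_neg h, if_neg h, pv_foldl_count (fun i => i ≤ location ∨ i > pos) sameL ans]

-- map/filter exchange used to identify the key sets of A and B
theorem pv_map_filter (priorities : List Int) (m : Int) :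
    ∀ (l : List Int),
    (l.filter (fun i => decide (m < PySem.List.pyGetD priorities i 0))).map
        (fun i => PySem.List.pyGetD priorities i 0)
      = (l.map (fun i => PySem.List.pyGetD priorities i 0)).filter (fun p => decide (m < p)) := by
  intro l
  induction l with
  | nil => rfl
  | cons x t ih =>
    rw [List.filter_cons, List.map_cons, List.filter_cons]
    cases h : decide (m < PySem.List.pyGetD priorities x 0)
    · simp [ih]
    · simp [ih]

theorem pv_KB (priorities : List Int) (m : Int) :
    pvK priorities m (PySem.List.pyRange 0 (priorities.length : Int) 1)
      = PySem.Set.ofList (priorities.filter (fun p => decide (m < p))) := by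
  unfold pvK
  rw [pv_map_filter priorities m, PySem.List.map_pyGetD_pyRange_zero' priorities 0]

theorem pv_main (priorities : List Int) (location : Int) :
    solution priorities location = solution_alt priorities location := by
  unfold solution solution_alt
  cases hm : PySem.List.pyGet? priorities location with
  | none => rfl
  | some mydoc =>
    dsimp only
    rw [pv_split1 priorities mydoc]
    dsimp only
    rw [pv_foldl_same priorities mydoc, List.nil_append, pv_dict priorities mydoc,
      pv_sorted_items priorities mydoc, List.foldl_map]
    dsimp only
    rw [pv_split2A priorities, pv_split2B priorities]
    dsimp only
    have hKne : ∀ k ∈ PySem.List.sorted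
        (pvK priorities mydoc (PySem.List.pyRange 0 (priorities.length : Int) 1))
        (fun x => x) true,
        (PySem.List.pyRange 0 (priorities.length : Int) 1).filter
          (fun i => decide (PySem.List.pyGetD priorities i 0 = k)) ≠ [] := by
      intro k hk
      rw [PySem.List.mem_sorted] at hk
      obtain ⟨-, i, hi, hPi⟩ := pv_K_mem priorities mydoc _ hk
      exact List.ne_nil_of_mem (List.mem_filter.mpr ⟨hi, decide_eq_true hPi⟩)
    have hKnd : (PySem.List.sorted
        (pvK priorities mydoc (PySem.List.pyRange 0 (priorities.length : Int) 1))
        (fun x => x) true).Nodup :=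
      ((PySem.List.sorted_perm _ _ _).nodup_iff).mpr
        (by unfold pvK; exact PySem.Set.nodup_ofList _)
    rw [pv_KB priorities mydoc] at hKne hKnd ⊢
    rw [pv_fold2 priorities _ 0 hKnd hKne (Or.inl rfl)]
    exact pv_final _ _ _ _

-- ===== VERDICT (by name: the statement is the Claim_ definition above) =====
theorem solution_spec : Claim_equal_solution := by
  intro priorities location _ _
  unfold Spec_solution
  exact pv_main priorities location
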